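-- pv_equiv track=rewrite | github.com/pypi-data/pypi-mirror-137 | packages/contester-cm/contester_cm-0.14-py3-none-any.whl/src/prepare_md.py | __read_sub
-- ===== SOURCE A (Python) =====
-- def __read_sup(index, data):
--     result = ""
--
--     if index < len(data) and data[index] != "^":
--         return index, result
--
--     index += 2
--     result = "<sup>"
--
--     while index < len(data) and data[index] != "]":
--
--         ans = __read_sup(index, data)
--
--         index = ans[0]
--         result += ans[1]
--
--         if index < len(data) and data[index] != "]":
--             result += data[index]
--             index += 1
--
--     result += "</sup>"
--     index += 1
--
--     return index, result
--
-- def __read_sub(index, data):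
--     result = ""
--
--     if index < len(data) and data[index] != "@":
--         return index, result
--
--     index += 2
--     result = "<sub>"
--
--     while index < len(data) and data[index] != "]":
--
--         ans = __read_sup(index, data)
--
--         index = ans[0]
--         result += ans[1]
--
--         if index < len(data) and data[index] != "]":
--             result += data[index]
--             index += 1
--
--     result += "</sub>"
--     index += 1
--
--     return index, result
-- ===== SOURCE B (Python) =====
-- def __read_sub(index, data):
--     n = len(data)
--     if index < n and data[index] != "@":
--         return index, ""
--     out = "<sub>"
--     stack = ["sub"]
--     index += 2
--     while stack:
--         if index < n and data[index] != "]":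
--             c = data[index]
--             if c == "^":
--                 stack.append("sup")
--                 out += "<sup>"
--                 index += 2
--             else:
--                 out += c
--                 index += 1
--         else:
--             out += "</" + stack.pop() + ">"
--             index += 1
--             # the character right after a closed group is emitted literally
--             if stack and index < n and data[index] != "]":
--                 out += data[index]
--                 index += 1
--     return index, out
-- ===== Notes on version B (the rewrite author's own statement) =====
-- stated objective: alternative
-- what changed: Replaces the mutually recursive __read_sup/__read_sub pair with a single iterative scan carrying an explicit stack of open tags (pop emits the closing tag; the character right after a closed group is emitted literally, as in A); Pre_ excludes only index < -len(data), where both A and B raise IndexError.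
import Mathlib
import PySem

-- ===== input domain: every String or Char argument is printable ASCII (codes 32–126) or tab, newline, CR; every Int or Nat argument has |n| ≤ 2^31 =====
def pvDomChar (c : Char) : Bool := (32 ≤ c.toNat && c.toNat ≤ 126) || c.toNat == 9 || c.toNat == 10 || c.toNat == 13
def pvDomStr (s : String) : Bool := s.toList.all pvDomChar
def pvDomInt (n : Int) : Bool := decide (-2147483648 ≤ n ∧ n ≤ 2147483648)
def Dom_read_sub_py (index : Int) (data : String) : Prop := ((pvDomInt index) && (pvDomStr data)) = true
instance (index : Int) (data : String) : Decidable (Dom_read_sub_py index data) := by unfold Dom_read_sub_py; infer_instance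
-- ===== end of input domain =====

-- B replaces A's mutual recursion (__read_sub/__read_sup) by one iterative scan with an explicit stack of open tags; same cost, different decomposition.


-- ===== PORT A =====
-- data[i] with Python's negative-index wrap; the default ' ' is never read on Pre_
-- (every access is guarded by i < len, and on Pre_ the running index stays ≥ -len).
def pvGetC (l : List Char) (i : Int) : Char := (PySem.List.pyGet? l i).getD ' '

-- The while loop shared verbatim by __read_sup and __read_sub (loopA), and __read_sup
-- itself (supA); fuel is only a totality guard, never reached under the initial bound.
mutual
def supA (l : List Char) : Nat → Int → Int × String
  | 0, i => (i, "")
  | f+1, i =>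
    if i < (l.length : Int) ∧ pvGetC l i ≠ '^' then (i, "")
    else
      let r := loopA l f (i + 2)
      (r.1 + 1, "<sup>" ++ r.2 ++ "</sup>")
def loopA (l : List Char) : Nat → Int → Int × String
  | 0, i => (i, "")
  | f+1, i =>
    if i < (l.length : Int) ∧ pvGetC l i ≠ ']' then
      let a := supA l f i
      if a.1 < (l.length : Int) ∧ pvGetC l a.1 ≠ ']' then
        let r := loopA l f (a.1 + 1)
        (r.1, a.2 ++ String.singleton (pvGetC l a.1) ++ r.2)
      else
        let r := loopA l f a.1
        (r.1, a.2 ++ r.2)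
    else (i, "")
end

def read_sub_py (index : Int) (data : String) : Int × String :=
  let l := data.toList
  if index < (l.length : Int) ∧ pvGetC l index ≠ '@' then (index, "")
  else
    let r := loopA l (((l.length : Int) - index + 3).toNat + 1) (index + 2)
    (r.1 + 1, "<sub>" ++ r.2 ++ "</sub>")

-- ===== PORT B =====
-- Iterative scan with an explicit stack of open tags (Source B's while loop).
def loopB (l : List Char) : List String → Int → String → Int × String
  | [], i, out => (i, out)
  | t :: st, i, out =>
    if i < (l.length : Int) ∧ pvGetC l i ≠ ']' then
      if pvGetC l i = '^' then
        loopB l ("sup" :: t :: st) (i + 2) (out ++ "<sup>")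
      else
        loopB l (t :: st) (i + 1) (out ++ String.singleton (pvGetC l i))
    else
      match st with
      | [] => (i + 1, out ++ "</" ++ t ++ ">")
      | u :: st' =>
        if i + 1 < (l.length : Int) ∧ pvGetC l (i + 1) ≠ ']' then
          loopB l (u :: st') (i + 2) (out ++ "</" ++ t ++ ">" ++ String.singleton (pvGetC l (i + 1)))
        else
          loopB l (u :: st') (i + 1) (out ++ "</" ++ t ++ ">")
termination_by st i _ => (((l.length : Int) - i).toNat, st.length)
decreasing_by
  · left; omega
  · left; omega
  · simp only [Prod.lex_def, List.length_cons]; omega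
  · simp only [Prod.lex_def, List.length_cons]; omega

def read_sub_py_alt (index : Int) (data : String) : Int × String :=
  let l := data.toList
  if index < (l.length : Int) ∧ pvGetC l index ≠ '@' then (index, "")
  else loopB l ["sub"] (index + 2) "<sub>"

-- ===== PRECONDITION & SPEC =====
-- A raises IndexError exactly when index < -len(data) (the first access data[index]
-- wraps past the front); Pre_ excludes exactly those inputs.
def Pre_read_sub_py (index : Int) (data : String) : Prop := -(data.length : Int) ≤ index
instance (index : Int) (data : String) : Decidable (Pre_read_sub_py index data) := by unfold Pre_read_sub_py; infer_instance
def pvWitness_read_sub_py : Int × String := (0, "@x2^y]z]")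

def Spec_read_sub_py (index : Int) (data : String) (out : Int × String) : Prop := out = read_sub_py_alt index data
instance (index : Int) (data : String) (out : Int × String) : Decidable (Spec_read_sub_py index data out) := by unfold Spec_read_sub_py; infer_instance

-- ===== CLAIM (what is proved, stated in full; the proofs are below) =====
def Claim_equal_read_sub_py : Prop := ∀ (index : Int) (data : String), Dom_read_sub_py index data → Pre_read_sub_py index data → Spec_read_sub_py index data (read_sub_py index data)

-- ===== LEMMAS AND PROOFS =====

-- String-literal gluing facts used to normalise outputs.
theorem lit_sup : ("</" : String) ++ "sup" ++ ">" = "</sup>" := by decide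
theorem lit_sub : ("</" : String) ++ "sub" ++ ">" = "</sub>" := by decide
theorem close_sup (s : String) : "</" ++ ("sup" ++ (">" ++ s)) = "</sup>" ++ s := by
  rw [← String.append_assoc, ← String.append_assoc, lit_sup]
theorem close_sup' : ("</" : String) ++ ("sup" ++ ">") = "</sup>" := by
  rw [← String.append_assoc, lit_sup]
theorem close_sub' : ("</" : String) ++ ("sub" ++ ">") = "</sub>" := by
  rw [← String.append_assoc, lit_sub]

-- When the loop guard fails, loopA is the identity regardless of fuel.
theorem loopA_stop (l : List Char) (f : Nat) (i : Int)
    (h : ¬ (i < (l.length : Int) ∧ pvGetC l i ≠ ']')) : loopA l f i = (i, "") := by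
  cases f with
  | zero => rw [loopA]
  | succ f => rw [loopA, if_neg h]

-- A non-'^' character makes supA a no-op regardless of fuel.
theorem supA_skip (l : List Char) (f : Nat) (i : Int)
    (h : i < (l.length : Int) ∧ pvGetC l i ≠ '^') : supA l f i = (i, "") := by
  cases f with
  | zero => rw [supA]
  | succ f => rw [supA, if_pos h]

-- One unfolding of A's loop when its guard holds (let-free form).
theorem loopA_step (l : List Char) (f : Nat) (i : Int)
    (hg : i < (l.length : Int) ∧ pvGetC l i ≠ ']') :
    loopA l (f+1) i =
      if (supA l f i).1 < (l.length : Int) ∧ pvGetC l (supA l f i).1 ≠ ']' then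
        ((loopA l f ((supA l f i).1 + 1)).1,
          (supA l f i).2 ++ String.singleton (pvGetC l (supA l f i).1) ++ (loopA l f ((supA l f i).1 + 1)).2)
      else ((loopA l f (supA l f i).1).1, (supA l f i).2 ++ (loopA l f (supA l f i).1).2) := by
  rw [loopA, if_pos hg]

-- Progress: the A-side loop never moves the index backwards.
theorem progressA (l : List Char) (f : Nat) :
    ∀ i : Int, i ≤ (supA l f i).1 ∧ i ≤ (loopA l f i).1 := by
  induction f with
  | zero => intro i; exact ⟨le_refl i, le_refl i⟩
  | succ f ih =>
    intro i
    constructor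
    · by_cases hs : i < (l.length : Int) ∧ pvGetC l i ≠ '^'
      · rw [supA_skip l (f+1) i hs]
      · rw [supA, if_neg hs]
        show i ≤ (loopA l f (i + 2)).1 + 1
        have := (ih (i + 2)).2
        omega
    · by_cases hg : i < (l.length : Int) ∧ pvGetC l i ≠ ']'
      · rw [loopA_step l f i hg]
        by_cases h2 : (supA l f i).1 < (l.length : Int) ∧ pvGetC l (supA l f i).1 ≠ ']'
        · rw [if_pos h2]
          show i ≤ (loopA l f ((supA l f i).1 + 1)).1
          have h1 := (ih i).1
          have := (ih ((supA l f i).1 + 1)).2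
          omega
        · rw [if_neg h2]
          show i ≤ (loopA l f (supA l f i).1).1
          have h1 := (ih i).1
          have := (ih (supA l f i).1).2
          omega
      · rw [loopA_stop l (f+1) i hg]

-- The close step of loopB, named so the bridge invariant can mention it.
def closeStep (l : List Char) (st : List String) (t : String) (i : Int) (out : String) : Int × String :=
  match st with
  | [] => (i + 1, out ++ "</" ++ t ++ ">")
  | u :: st' =>
    if i + 1 < (l.length : Int) ∧ pvGetC l (i + 1) ≠ ']' then
      loopB l (u :: st') (i + 2) (out ++ "</" ++ t ++ ">" ++ String.singleton (pvGetC l (i + 1)))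
    else
      loopB l (u :: st') (i + 1) (out ++ "</" ++ t ++ ">")

theorem loopB_close (l : List Char) (st : List String) (t : String) (i : Int) (out : String)
    (h : ¬ (i < (l.length : Int) ∧ pvGetC l i ≠ ']')) :
    loopB l (t :: st) i out = closeStep l st t i out := by
  conv_lhs => rw [loopB.eq_def]
  dsimp only
  rw [if_neg h]
  rfl

theorem loopB_open (l : List Char) (st : List String) (t : String) (i : Int) (out : String)
    (h : i < (l.length : Int) ∧ pvGetC l i ≠ ']') (hc : pvGetC l i = '^') :
    loopB l (t :: st) i out = loopB l ("sup" :: t :: st) (i + 2) (out ++ "<sup>") := by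
  conv_lhs => rw [loopB.eq_def]
  dsimp only
  rw [if_pos h, if_pos hc]

theorem loopB_char (l : List Char) (st : List String) (t : String) (i : Int) (out : String)
    (h : i < (l.length : Int) ∧ pvGetC l i ≠ ']') (hc : ¬ pvGetC l i = '^') :
    loopB l (t :: st) i out = loopB l (t :: st) (i + 1) (out ++ String.singleton (pvGetC l i)) := by
  conv_lhs => rw [loopB.eq_def]
  dsimp only
  rw [if_pos h, if_neg hc]

-- Main bridge: running B's stack loop with top tag t equals running A's level loop
-- to completion, then performing B's close step on the accumulated output.
theorem bridge (l : List Char) (f : Nat) :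
    ∀ (i : Int) (st : List String) (t out : String), (l.length : Int) - i < (f : Int) →
      loopB l (t :: st) i out = closeStep l st t (loopA l f i).1 (out ++ (loopA l f i).2) := by
  induction f using Nat.strong_induction_on with
  | _ f ih =>
    intro i st t out hf
    by_cases hg : i < (l.length : Int) ∧ pvGetC l i ≠ ']'
    · obtain ⟨f', rfl⟩ : ∃ f', f = f' + 1 := by
        cases f with
        | zero => exfalso; have := hg.1; simp at hf; omega
        | succ f' => exact ⟨f', rfl⟩
      by_cases hc : pvGetC l i = '^'
      · -- open a sup level
        obtain ⟨f'', rfl⟩ : ∃ f'', f' = f'' + 1 := by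
          cases f' with
          | zero => exfalso; have := hg.1; simp at hf; omega
          | succ f'' => exact ⟨f'', rfl⟩
        have hsup : supA l (f'' + 1) i =
            ((loopA l f'' (i + 2)).1 + 1, "<sup>" ++ (loopA l f'' (i + 2)).2 ++ "</sup>") := by
          rw [supA, if_neg (by simp [hc])]
        have hji : i + 2 ≤ (loopA l f'' (i + 2)).1 := (progressA l f'' (i + 2)).2
        set j := (loopA l f'' (i + 2)).1 with hj
        rw [loopB_open l st t i out hg hc,
            ih f'' (by omega) (i + 2) (t :: st) "sup" (out ++ "<sup>") (by omega),
            ← hj]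
        rw [loopA_step l (f'' + 1) i hg, hsup]
        simp only [closeStep]
        by_cases h3 : j + 1 < (l.length : Int) ∧ pvGetC l (j + 1) ≠ ']'
        · rw [if_pos h3, if_pos h3,
              ih (f'' + 1) (by omega) (j + 2) st t _ (by omega)]
          have : j + 1 + 1 = j + 2 := by omega
          rw [this]
          congr 1
          simp only [String.append_assoc, close_sup]
        · rw [if_neg h3, if_neg h3, loopA_stop l (f'' + 1) (j + 1) h3,
              loopB_close l st t (j + 1) _ h3]
          congr 1
          simp only [String.append_assoc, close_sup', String.append_empty]
      · -- literal character
        rw [loopB_char l st t i out hg hc,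
            ih f' (by omega) (i + 1) st t _ (by omega),
            loopA_step l f' i hg, supA_skip l f' i ⟨hg.1, hc⟩]
        simp only []
        rw [if_pos hg]
        congr 1
        simp only [String.append_assoc, String.empty_append]
    · -- guard fails: close this level
      rw [loopB_close l st t i out hg, loopA_stop l f i hg]
      simp only []
      rw [String.append_empty]

-- ===== VERDICT (by name: the statement is the Claim_ definition above) =====
theorem read_sub_py_spec : Claim_equal_read_sub_py := by
  intro index data _hdom _hpre
  unfold Spec_read_sub_py read_sub_py read_sub_py_alt
  simp only []
  by_cases hg : index < ((data.toList.length : Int)) ∧ pvGetC data.toList index ≠ '@'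
  · rw [if_pos hg, if_pos hg]
  · rw [if_neg hg, if_neg hg]
    set l := data.toList
    have hfuel : (l.length : Int) - (index + 2) <
        (((((l.length : Int) - index + 3).toNat + 1 : Nat) : Int)) := by
      have h1 := Int.self_le_toNat ((l.length : Int) - index + 3)
      push_cast
      omega
    rw [bridge l (((l.length : Int) - index + 3).toNat + 1) (index + 2) [] "sub" "<sub>" hfuel]
    simp only [closeStep]
    congr 1
    simp only [String.append_assoc, close_sub']
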